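-- pv_equiv track=rewrite | github.com/azhai/markdoc | src/markdoc/builder.py | remove_hidden
-- ===== SOURCE A (Python) =====
-- def remove_hidden(names):
--     """Remove (in-place) all strings starting with a '.' in the given list."""
--
--     i = 0
--     while i < len(names):
--         if names[i].startswith('.'):
--             names.pop(i)
--         else:
--             i += 1
--     return names
-- ===== SOURCE B (Python) =====
-- def remove_hidden(names):
--     """Remove (in-place) all strings starting with a '.' in the given list."""
--     w = 0
--     for r in range(len(names)):
--         if not names[r].startswith('.'):
--             names[w] = names[r]
--             w += 1
--     del names[w:]
--     return names
-- ===== Notes on version B (the rewrite author's own statement) =====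
-- stated objective: alternative
-- what changed: Replaces the while-loop that repeatedly pops matching elements in place with a single forward-pass two-pointer compaction (overwrite kept elements at a write index, then truncate once).
import Mathlib
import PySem

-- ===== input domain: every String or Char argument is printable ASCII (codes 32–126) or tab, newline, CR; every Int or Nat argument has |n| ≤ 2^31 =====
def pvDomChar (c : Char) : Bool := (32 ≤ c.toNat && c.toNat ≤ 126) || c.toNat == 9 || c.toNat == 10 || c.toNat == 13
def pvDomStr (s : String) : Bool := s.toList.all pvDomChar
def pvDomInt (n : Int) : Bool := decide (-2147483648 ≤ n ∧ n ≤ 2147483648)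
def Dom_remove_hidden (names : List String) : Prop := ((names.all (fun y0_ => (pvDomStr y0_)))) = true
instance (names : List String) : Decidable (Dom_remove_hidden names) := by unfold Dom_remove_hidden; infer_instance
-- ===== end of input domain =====

-- B replaces A's pop-in-a-while-loop with a single-pass two-pointer in-place
-- compaction plus one truncation (return value proved equal; both mutate the
-- argument in Python, B via overwrite-and-truncate instead of repeated pops).


-- ===== PORT A =====
-- A's while loop: if names[i].startswith('.') then names.pop(i) (value discarded,
-- list becomes names.eraseIdx i) else i += 1.
def removeHiddenLoopA (i : Nat) (names : List String) : List String :=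
  if h : i < names.length then
    if PySem.Str.startswith names[i] "." then
      removeHiddenLoopA i (names.eraseIdx i)
    else
      removeHiddenLoopA (i + 1) names
  else names
termination_by names.length - i
decreasing_by
  · simp [List.length_eraseIdx, h]; omega
  · omega

def remove_hidden (names : List String) : List String :=
  removeHiddenLoopA 0 names

-- ===== PORT B =====
-- B's for loop over r: if not names[r].startswith('.') then names[w] = names[r]; w += 1.
-- Afterwards 'del names[w:]' = take w.
def removeHiddenLoopB (r w : Nat) (arr : List String) : List String :=
  if h : r < arr.length then
    if PySem.Str.startswith arr[r] "." then
      removeHiddenLoopB (r + 1) w arr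
    else
      removeHiddenLoopB (r + 1) (w + 1) (arr.set w arr[r])
  else arr.take w
termination_by arr.length - r

def remove_hidden_alt (names : List String) : List String :=
  removeHiddenLoopB 0 0 names

-- ===== PRECONDITION & SPEC =====
def Spec_remove_hidden (names : List String) (out : List String) : Prop := out = remove_hidden_alt names
instance (names : List String) (out : List String) : Decidable (Spec_remove_hidden names out) := by unfold Spec_remove_hidden; infer_instance

-- ===== CLAIM (what is proved, stated in full; the proofs are below) =====
def Claim_equal_remove_hidden : Prop := ∀ (names : List String), Dom_remove_hidden names → Spec_remove_hidden names (remove_hidden names)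

-- ===== LEMMAS AND PROOFS =====

def removeHiddenKeep (s : String) : Bool := ! PySem.Str.startswith s "."

lemma loopA_eq_filter (i : Nat) (names : List String) :
    removeHiddenLoopA i names = names.take i ++ (names.drop i).filter removeHiddenKeep := by
  induction i, names using removeHiddenLoopA.induct with
  | case1 i names h hsw ih =>
    rw [removeHiddenLoopA]
    simp only [h, dif_pos, hsw, if_pos, ih]
    simp only [PySem.Str.startswith_eq, show ".".toList = ['.'] from rfl] at hsw
    have hdrop : names.drop i = names[i] :: names.drop (i + 1) :=
      List.drop_eq_getElem_cons h
    have hlt : (names.take i).length = i := by simp [Nat.le_of_lt h]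
    rw [List.eraseIdx_eq_take_drop_succ]
    congr 1
    · rw [List.take_left' hlt]
    · rw [List.drop_left' hlt, hdrop, List.filter_cons]
      simp [removeHiddenKeep, hsw]
  | case2 i names h hsw ih =>
    rw [removeHiddenLoopA]
    simp only [h, dif_pos, hsw, if_neg, Bool.not_eq_true, ih]
    have hdrop : names.drop i = names[i] :: names.drop (i + 1) :=
      List.drop_eq_getElem_cons h
    have htake : names.take (i + 1) = names.take i ++ [names[i]] :=
      List.take_succ_eq_append_getElem h
    simp only [PySem.Str.startswith_eq, show ".".toList = ['.'] from rfl] at hsw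
    rw [htake, hdrop, List.filter_cons]
    simp [removeHiddenKeep, hsw]
    rw [htake, List.append_assoc]
    rfl
  | case3 i names h =>
    rw [removeHiddenLoopA]
    have hlen : names.length ≤ i := by omega
    simp [h, List.take_of_length_le hlen, List.drop_of_length_le hlen]

lemma loopB_eq_filter (r w : Nat) (arr : List String) (hw : w ≤ r) :
    removeHiddenLoopB r w arr = arr.take w ++ (arr.drop r).filter removeHiddenKeep := by
  induction r, w, arr using removeHiddenLoopB.induct with
  | case1 r w arr h hsw ih =>
    rw [removeHiddenLoopB]
    simp only [h, dif_pos, hsw, if_pos]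
    rw [ih (by omega)]
    simp only [PySem.Str.startswith_eq, show ".".toList = ['.'] from rfl] at hsw
    have hdrop : arr.drop r = arr[r] :: arr.drop (r + 1) := List.drop_eq_getElem_cons h
    rw [hdrop, List.filter_cons]
    simp [removeHiddenKeep, hsw]
  | case2 r w arr h hsw ih =>
    rw [removeHiddenLoopB]
    simp only [h, dif_pos, hsw, if_neg, Bool.not_eq_true]
    rw [ih (by omega)]
    have hwlt : w < arr.length := by omega
    have hdrop : arr.drop r = arr[r] :: arr.drop (r + 1) := List.drop_eq_getElem_cons h
    have h1 : (arr.set w arr[r]).take (w + 1) = arr.take w ++ [arr[r]] := by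
      rw [List.take_succ_eq_append_getElem (by simpa using hwlt)]
      rw [List.take_set_of_le (Nat.le_refl w)]
      congr 1
      simp
    have h2 : (arr.set w arr[r]).drop (r + 1) = arr.drop (r + 1) := by
      rw [List.drop_set_of_lt (by omega)]
    simp only [PySem.Str.startswith_eq, show ".".toList = ['.'] from rfl] at hsw
    rw [h1, h2, hdrop, List.filter_cons]
    simp [removeHiddenKeep, hsw]
  | case3 r w arr h =>
    rw [removeHiddenLoopB]
    have hlen : arr.length ≤ r := by omega
    simp [h, List.drop_of_length_le hlen]

-- ===== VERDICT (by name: the statement is the Claim_ definition above) =====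
theorem remove_hidden_spec : Claim_equal_remove_hidden := by
  intro names _
  show remove_hidden names = remove_hidden_alt names
  rw [remove_hidden, remove_hidden_alt, loopA_eq_filter, loopB_eq_filter 0 0 names (Nat.le_refl 0)]
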